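-- pv_equiv track=rewrite | github.com/Alaedindouak/Python_tasks | 54_tasks.py | func_47
-- ===== SOURCE A (Python) =====
-- def func_47(matrix):
--
--     numbers= []
--     num = 0
--     counter = 0
--
--     for i in range( len(matrix) ) :
--         for j in range( len( matrix[i] ) ) :
--
--            numbers.append( matrix[i][j] )
--
--            for n in numbers:
--                 frequency = numbers.count(n)
--
--                 if frequency > counter:
--                     counter = frequency
--                     num = n
--
--
--     return num
-- ===== SOURCE B (Python) =====
-- def func_47(matrix):
--     # Two-pass mode: count all frequencies, take the global max M, then
--     # return the first element (in row-major order) whose running count reaches M.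
--     flat = [x for row in matrix for x in row]
--     if not flat:
--         return 0
--     counts = {}
--     for x in flat:
--         counts[x] = counts.get(x, 0) + 1
--     m = max(counts.values())
--     running = {}
--     for x in flat:
--         running[x] = running.get(x, 0) + 1
--         if running[x] == m:
--             return x
--     return 0  # unreachable
-- ===== Notes on version B (the rewrite author's own statement) =====
-- stated objective: faster
-- what changed: Replaced A's cubic interleaved scheme (after every append, rescan the whole accumulated list calling list.count on each element while updating a running max) by a two-pass linear scheme: flatten, build a frequency dict once, take the global maximum M, then a second pass with running per-element counts returns the first element whose running count reaches M (A's tie-break).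
import Mathlib
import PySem

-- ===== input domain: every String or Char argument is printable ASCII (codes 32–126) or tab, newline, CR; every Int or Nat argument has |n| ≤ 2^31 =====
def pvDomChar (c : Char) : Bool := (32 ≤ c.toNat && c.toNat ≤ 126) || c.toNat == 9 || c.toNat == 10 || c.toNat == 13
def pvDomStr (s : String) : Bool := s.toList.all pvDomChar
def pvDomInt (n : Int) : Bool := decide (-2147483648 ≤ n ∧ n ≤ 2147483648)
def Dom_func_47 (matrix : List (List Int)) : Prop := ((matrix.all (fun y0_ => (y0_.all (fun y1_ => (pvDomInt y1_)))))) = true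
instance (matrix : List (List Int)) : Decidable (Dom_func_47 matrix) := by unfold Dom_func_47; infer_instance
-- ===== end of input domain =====

-- B replaces A's cubic rescan-after-every-append mode search by a two-pass linear count-then-first-to-reach-M scan (same value, including A's tie-break).

-- ===== PORT A =====
-- the body of A's innermost loop: for n in numbers: frequency = numbers.count(n); if frequency > counter: counter, num = frequency, n
def pvInner (numbers : List Int) (p : Int × Int) (n : Int) : Int × Int :=
  let frequency : Int := (PySem.List.count numbers n : Int)
  if frequency > p.2 then (n, frequency) else p

-- the body of A's j-loop: numbers.append(matrix[i][j]) then the inner rescan; state (numbers, num, counter)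
def pvStepA (st : List Int × Int × Int) (x : Int) : List Int × Int × Int :=
  let numbers := st.1 ++ [x]
  let nc := numbers.foldl (pvInner numbers) (st.2.1, st.2.2)
  (numbers, nc.1, nc.2)

def func_47 (matrix : List (List Int)) : Int :=
  let st :=
    (PySem.List.pyRange 0 (matrix.length : Int) 1).foldl
      (fun (st : List Int × Int × Int) i =>
        let row := PySem.List.pyGetD matrix i []
        (PySem.List.pyRange 0 (row.length : Int) 1).foldl
          (fun st j => pvStepA st (PySem.List.pyGetD row j 0)) st)
      ([], 0, 0)
  st.2.1

-- ===== PORT B =====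
-- B's second loop: running counts, return the first x whose running count reaches m
def pvScan (m : Int) : List Int → PySem.Dict Int Int → Int
  | [], _ => 0  -- unreachable when m is the max frequency of the scanned list
  | x :: rest, d =>
    let d' := d.insert x (d.getD x 0 + 1)
    if d'.getD x 0 = m then x else pvScan m rest d'

def func_47_alt (matrix : List (List Int)) : Int :=
  let flat := matrix.flatMap (fun row => row)
  match flat with
  | [] => 0
  | _ :: _ =>
    let counts := flat.foldl (fun d x => d.insert x (d.getD x 0 + 1)) PySem.Dict.empty
    match PySem.List.max? counts.values (fun v => v) with
    | none => 0  -- unreachable: counts.values is nonempty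
    | some m => pvScan m flat PySem.Dict.empty

-- ===== PRECONDITION & SPEC =====
def Spec_func_47 (matrix : List (List Int)) (out : Int) : Prop := out = func_47_alt matrix
instance (matrix : List (List Int)) (out : Int) : Decidable (Spec_func_47 matrix out) := by unfold Spec_func_47; infer_instance

-- ===== CLAIM (what is proved, stated in full; the proofs are below) =====
def Claim_equal_func_47 : Prop := ∀ (matrix : List (List Int)), Dom_func_47 matrix → Spec_func_47 matrix (func_47 matrix)

-- ===== LEMMAS AND PROOFS =====

-- A's inner rescan does nothing when no frequency exceeds the counter
lemma pv_inner_no (ns : List Int) :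
    ∀ (L : List Int) (num c : Int), (∀ n ∈ L, (PySem.List.count ns n : Int) ≤ c) →
      L.foldl (pvInner ns) (num, c) = (num, c) := by
  intro L
  induction L with
  | nil => intro num c _; rfl
  | cons y L ih =>
    intro num c h
    simp only [List.foldl_cons, pvInner]
    rw [if_neg (by exact not_lt.mpr (h y (by simp)))]
    exact ih num c (fun n hn => h n (by simp [hn]))

-- A's inner rescan updates to (x, count x) when only x's frequency can exceed the counter and it does
lemma pv_inner_up (ns : List Int) (x : Int) :
    ∀ (L : List Int) (num c : Int), c < (PySem.List.count ns x : Int) →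
      (∀ n ∈ L, n = x ∨ (PySem.List.count ns n : Int) ≤ c) → x ∈ L →
      L.foldl (pvInner ns) (num, c) = (x, (PySem.List.count ns x : Int)) := by
  intro L
  induction L with
  | nil => intro _ _ _ _ hx; cases hx
  | cons y L ih =>
    intro num c hc h hx
    by_cases hyx : y = x
    · subst hyx
      simp only [List.foldl_cons, pvInner, if_pos hc]
      exact pv_inner_no ns L y (PySem.List.count ns y : Int)
        (fun n hn => by
          rcases h n (by simp [hn]) with rfl | hle
          · exact le_refl _
          · exact le_of_lt (lt_of_le_of_lt hle hc))
    · have hyc : (PySem.List.count ns y : Int) ≤ c := by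
        rcases h y (by simp) with rfl | hle
        · exact absurd rfl hyx
        · exact hle
      simp only [List.foldl_cons, pvInner, if_neg (not_lt.mpr hyc)]
      exact ih num c hc (fun n hn => h n (by simp [hn]))
        (by rcases List.mem_cons.mp hx with h' | h'
            · exact absurd h'.symm hyx
            · exact h')

-- once the counter equals a bound dominating every frequency of the whole flat list, num never changes
lemma pv_stable :
    ∀ (rest seen : List Int) (num c : Int),
      (∀ n : Int, ((seen ++ rest).count n : Int) ≤ c) →
      (rest.foldl pvStepA (seen, num, c)).2.1 = num := by
  intro rest
  induction rest with
  | nil => intro seen num c _; rfl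
  | cons x rest ih =>
    intro seen num c h
    simp only [List.foldl_cons]
    have hstep : pvStepA (seen, num, c) x = (seen ++ [x], num, c) := by
      simp only [pvStepA]
      rw [pv_inner_no (seen ++ [x]) (seen ++ [x]) num c
        (fun n _ => by
          have := h n
          simp only [List.count_append, List.count_cons] at this ⊢
          push_cast at this ⊢
          by_cases hnx : x = n <;> simp [hnx] at this ⊢ <;> omega)]
    rw [hstep]
    exact ih (seen ++ [x]) num c (fun n => by rw [List.append_assoc]; simpa using h n)

-- main invariant: while the counter is still below the global max m, A's remaining fold
-- returns the same element as B's threshold scan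
lemma pv_main (m : Int) :
    ∀ (rest seen : List Int) (num c : Int) (d : PySem.Dict Int Int),
      (∀ n : Int, d.getD n 0 = (seen.count n : Int)) →
      (∀ n : Int, (seen.count n : Int) ≤ c) →
      c < m →
      (∀ n : Int, ((seen ++ rest).count n : Int) ≤ m) →
      (∃ n ∈ seen ++ rest, ((seen ++ rest).count n : Int) = m) →
      (rest.foldl pvStepA (seen, num, c)).2.1 = pvScan m rest d := by
  intro rest
  induction rest with
  | nil =>
    intro seen num c d _ hle hcm _ hex
    rcases hex with ⟨n, _, hn⟩
    simp only [List.append_nil] at hn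
    exact absurd (hn ▸ hle n) (not_le.mpr hcm)
  | cons x rest ih =>
    intro seen num c d hd hle hcm hmax hex
    have hcount_ns : ∀ n : Int, ((seen ++ [x]).count n : Int) =
        (seen.count n : Int) + (if x = n then 1 else 0) := by
      intro n
      simp only [List.count_append, List.count_cons]
      by_cases hnx : x = n <;> push_cast <;> simp [hnx]
    have hcnt : ((seen ++ [x]).count x : Int) = (seen.count x : Int) + 1 := by
      rw [hcount_ns x]; simp
    have hfull : seen ++ [x] ++ rest = seen ++ x :: rest := (List.append_cons seen x rest).symm
    -- B side: the updated running count of x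
    have hd' : ∀ n : Int, (d.insert x (d.getD x 0 + 1)).getD n 0 = ((seen ++ [x]).count n : Int) := by
      intro n
      by_cases hnx : n = x
      · subst hnx
        rw [PySem.Dict.getD_insert_self, hd, hcnt]
      · rw [PySem.Dict.getD_insert_of_ne _ _ _ hnx, hd, hcount_ns]
        simp [Ne.symm hnx]
    have hdx : (d.insert x (d.getD x 0 + 1)).getD x 0 = ((seen ++ [x]).count x : Int) := hd' x
    simp only [List.foldl_cons, pvScan]
    by_cases hm : ((seen ++ [x]).count x : Int) = m
    · -- the global max is reached at x: B returns x, A fixes num := x forever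
      rw [if_pos (by rw [hdx, hm])]
      have hstep : pvStepA (seen, num, c) x = (seen ++ [x], x, ((seen ++ [x]).count x : Int)) := by
        simp only [pvStepA]
        rw [pv_inner_up (seen ++ [x]) x (seen ++ [x]) num c
          (by rw [PySem.List.count]; omega)
          (fun n hn => by
            rcases List.mem_append.mp hn with hn | hn
            · by_cases hnx : n = x
              · exact Or.inl hnx
              · refine Or.inr ?_
                rw [PySem.List.count, hcount_ns]
                have := hle n
                simp [Ne.symm hnx]
                omega
            · exact Or.inl (by simpa using hn))
          (by simp)]
        rfl
      rw [hstep]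
      refine pv_stable rest (seen ++ [x]) x ((seen ++ [x]).count x : Int) ?_
      intro n
      rw [hm, hfull]
      exact hmax n
    · -- not yet: both sides continue
      rw [if_neg (by rw [hdx]; exact hm)]
      have hcnt_lt : ((seen ++ [x]).count x : Int) < m := by
        have h1 : ((seen ++ x :: rest).count x : Int) ≤ m := hmax x
        have h2 : ((seen ++ [x]).count x : Int) ≤ ((seen ++ x :: rest).count x : Int) := by
          rw [← hfull]
          simp only [List.count_append]
          push_cast
          omega
        omega
      by_cases hcu : c < ((seen ++ [x]).count x : Int)
      · -- A updates (num, counter) := (x, count x), still below m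
        have hstep : pvStepA (seen, num, c) x = (seen ++ [x], x, ((seen ++ [x]).count x : Int)) := by
          simp only [pvStepA]
          rw [pv_inner_up (seen ++ [x]) x (seen ++ [x]) num c
            (by rw [PySem.List.count]; exact hcu)
            (fun n hn => by
              rcases List.mem_append.mp hn with hn | hn
              · by_cases hnx : n = x
                · exact Or.inl hnx
                · refine Or.inr ?_
                  rw [PySem.List.count, hcount_ns]
                  have := hle n
                  simp [Ne.symm hnx]
                  omega
              · exact Or.inl (by simpa using hn))
            (by simp)]
          rfl
        rw [hstep]
        refine ih (seen ++ [x]) x ((seen ++ [x]).count x : Int) _ hd'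
          (fun n => by
            rw [hcount_ns]
            by_cases hnx : x = n
            · subst hnx; rw [hcnt]; simp
            · have := hle n
              simp [hnx]
              omega)
          hcnt_lt
          (fun n => by rw [List.append_assoc]; simpa using hmax n)
          (by rw [List.append_assoc]; simpa using hex)
      · -- A does not update
        have hstep : pvStepA (seen, num, c) x = (seen ++ [x], num, c) := by
          simp only [pvStepA]
          rw [pv_inner_no (seen ++ [x]) (seen ++ [x]) num c
            (fun n _ => by
              by_cases hnx : n = x
              · subst hnx; rw [PySem.List.count]; omega
              · rw [PySem.List.count, hcount_ns]
                have := hle n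
                simp [Ne.symm hnx]
                omega)]
        rw [hstep]
        exact ih (seen ++ [x]) num c _ hd' (fun n => by
            rw [hcount_ns]
            by_cases hnx : x = n
            · subst hnx; rw [hcnt] at hcu; have := hle x; omega
            · have := hle n; simp [hnx]; omega)
          hcm
          (fun n => by rw [List.append_assoc]; simpa using hmax n)
          (by rw [List.append_assoc]; simpa using hex)

-- A collapses to a single fold over the flattened matrix
lemma pv_A_flat (matrix : List (List Int)) :
    func_47 matrix = ((matrix.flatMap (fun row => row)).foldl pvStepA ([], 0, 0)).2.1 := by
  simp only [func_47, PySem.List.foldl_pyRange_zero_pyGetD']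
  rw [show (matrix.flatMap (fun row => row)) = matrix.flatten by simp]
  rw [List.foldl_flatten]

-- ===== VERDICT (by name: the statement is the Claim_ definition above) =====
theorem func_47_spec : Claim_equal_func_47 := by
  intro matrix _
  unfold Spec_func_47
  rw [pv_A_flat]
  unfold func_47_alt
  cases hf : matrix.flatMap (fun row => row) with
  | nil => simp
  | cons y t =>
    simp only
    rw [PySem.Dict.foldl_insert_getD_add_one_eq_counter]
    have hvals : (PySem.Dict.counter (y :: t)).values =
        (PySem.Set.ofList (y :: t)).map (fun k => ((y :: t).count k : Int)) := by
      simp [PySem.Dict.values, PySem.Dict.items_counter]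
    cases hmax : PySem.List.max? (PySem.Dict.counter (y :: t)).values (fun v => v) with
    | none =>
      exfalso
      rw [PySem.List.max?_eq_none_iff, hvals, List.map_eq_nil_iff] at hmax
      have hy : y ∈ PySem.Set.ofList (y :: t) := (PySem.Set.mem_ofList _ _).mpr (by simp)
      rw [hmax] at hy
      cases hy
    | some m =>
      have hmem := PySem.List.max?_mem hmax
      rw [hvals] at hmem
      rcases List.mem_map.mp hmem with ⟨k, hk, hkm⟩
      have hkmem : k ∈ (y :: t) := (PySem.Set.mem_ofList _ _).mp hk
      have hmpos : 0 < m := by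
        rw [← hkm]
        exact_mod_cast List.count_pos_iff.mpr hkmem
      have hmax_all : ∀ n : Int, (((y :: t)).count n : Int) ≤ m := by
        intro n
        by_cases hn : n ∈ (y :: t)
        · have : ((y :: t).count n : Int) ∈ (PySem.Dict.counter (y :: t)).values := by
            rw [hvals]
            exact List.mem_map.mpr ⟨n, (PySem.Set.mem_ofList _ _).mpr hn, rfl⟩
          exact PySem.List.max?_isMax hmax _ this
        · rw [List.count_eq_zero_of_not_mem hn]
          exact_mod_cast le_of_lt hmpos
      refine pv_main m (y :: t) [] 0 0 PySem.Dict.empty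
        (fun n => by simp [PySem.Dict.getD_empty])
        (fun n => by simp)
        hmpos
        (fun n => by simpa using hmax_all n)
        ⟨k, by simpa using hkmem, by simpa using hkm⟩
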